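-- pv_equiv track=rewrite | github.com/shieldsheafson/pokersim | pokersim2.py | prep_pool
-- ===== SOURCE A (Python) =====
-- def prep_pool(real_pool):
--
--     # creates 3 lists:
--     # one with just the values of cards
--     # one with just the values and no duplicates
--     # one with a list of all the duplicates in the pool
--
--     # returns 3 lists
--
--     pool = real_pool.copy()
--     duplicates = [0, 0, 0, 0, 0, 0, 0, 0, 0, 0, 0, 0, 0]
--     straight_pool = []
--     temp_pool = pool.copy()
--     pool.clear()
--
--     for num,card in enumerate(temp_pool):
--         card = int(card / 10000)
--         pool.append(card)
--         if num != 0 and pool[num-1] == card: duplicates[card - 2] += 1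
--         else: straight_pool.append(card)
--
--     return pool, straight_pool, duplicates
-- ===== SOURCE B (Python) =====
-- def prep_pool(real_pool):
--     # Pass 1: map every card to its value.
--     pool = [int(c / 10000) for c in real_pool]
--     # Pass 2: walk the value list run by run (maximal blocks of equal
--     # adjacent values): one straight_pool entry per run, and run-1 added
--     # to that value's duplicate counter in one step.
--     duplicates = [0, 0, 0, 0, 0, 0, 0, 0, 0, 0, 0, 0, 0]
--     straight_pool = []
--     n = len(pool)
--     i = 0
--     while i < n:
--         v = pool[i]
--         j = i + 1
--         while j < n and pool[j] == v:
--             j += 1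
--         straight_pool.append(v)
--         if j - i > 1:
--             duplicates[v - 2] += j - i - 1
--         i = j
--     return pool, straight_pool, duplicates
-- ===== Notes on version B (the rewrite author's own statement) =====
-- stated objective: alternative
-- what changed: Replaces A's single enumerate pass with back-indexing into the list being built (pool[num-1] adjacency test, one counter bump per duplicate) by a build-then-group decomposition: first map all cards to values, then consume that list run by run, emitting one straight_pool entry and one aggregated duplicates update per run.
import Mathlib
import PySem

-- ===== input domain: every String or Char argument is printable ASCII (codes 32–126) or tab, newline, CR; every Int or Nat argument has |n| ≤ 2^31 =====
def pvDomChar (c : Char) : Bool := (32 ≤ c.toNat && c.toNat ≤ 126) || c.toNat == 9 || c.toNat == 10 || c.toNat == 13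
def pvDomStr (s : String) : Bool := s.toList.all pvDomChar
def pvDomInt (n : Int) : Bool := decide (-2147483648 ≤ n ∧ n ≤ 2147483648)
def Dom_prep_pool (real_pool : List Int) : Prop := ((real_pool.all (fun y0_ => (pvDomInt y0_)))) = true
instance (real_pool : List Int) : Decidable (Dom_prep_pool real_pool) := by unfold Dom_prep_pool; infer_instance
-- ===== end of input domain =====

-- B re-decomposes A's adjacency-indexing pass as map-to-values then group-runs (objective: alternative, same cost).

-- duplicates[i] += d  (Python index semantics: negative wrap; out of range Python raises
-- IndexError — excluded by Pre_, the total forms pySetD/pyGetD leave the list unchanged there)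
def pyIncAt (xs : List Int) (i : Int) (d : Int) : List Int :=
  PySem.List.pySetD xs i (PySem.List.pyGetD xs i 0 + d)

-- ===== PORT A =====
-- A's loop body: card = int(card/10000) (exact as truncdiv on Dom, |card| ≤ 2^31 < 2^53);
-- pool.append; if num != 0 and pool[num-1] == card then duplicates[card-2] += 1 else append to straight_pool
def prep_pool_step (st : List Int × List Int × List Int) (nc : Int × Int) :
    List Int × List Int × List Int :=
  let card := PySem.Int.truncdiv nc.2 10000
  let pool' := st.1 ++ [card]
  if nc.1 ≠ 0 ∧ PySem.List.pyGet? pool' (nc.1 - 1) = some card then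
    (pool', st.2.1, pyIncAt st.2.2 (card - 2) 1)
  else
    (pool', st.2.1 ++ [card], st.2.2)

def prep_pool (real_pool : List Int) : List Int × List Int × List Int :=
  (PySem.List.enumerate real_pool).foldl prep_pool_step
    ([], [], [0, 0, 0, 0, 0, 0, 0, 0, 0, 0, 0, 0, 0])

-- ===== PORT B =====
-- inner while: j scans forward while pool[j] == v (0 ≤ j, guarded j < n, so getD is exact)
def scanRun (pool : List Int) (v : Int) (j : Nat) : Nat :=
  if j < pool.length then
    if pool.getD j 0 = v then scanRun pool v (j + 1) else j
  else j
termination_by pool.length - j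

theorem scanRun_ge (pool : List Int) (v : Int) : ∀ j, j ≤ scanRun pool v j := by
  intro j
  fun_induction scanRun pool v j with
  | case1 j hj hv ih => omega
  | case2 j hj hv => omega
  | case3 j hj => omega

-- outer while over the running index i
def altLoop (pool : List Int) (i : Nat) (straight duplicates : List Int) :
    List Int × List Int :=
  if h : i < pool.length then
    let v := pool.getD i 0
    let j := scanRun pool v (i + 1)
    let straight' := straight ++ [v]
    let duplicates' :=
      if j - i > 1 then pyIncAt duplicates (v - 2) ((j : Int) - (i : Int) - 1)
      else duplicates
    altLoop pool j straight' duplicates'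
  else (straight, duplicates)
termination_by pool.length - i
decreasing_by
  have := scanRun_ge pool (pool.getD i 0) (i + 1)
  omega

def prep_pool_alt (real_pool : List Int) : List Int × List Int × List Int :=
  let pool := real_pool.map (fun c => PySem.Int.truncdiv c 10000)
  let sd := altLoop pool 0 [] [0, 0, 0, 0, 0, 0, 0, 0, 0, 0, 0, 0, 0]
  (pool, sd.1, sd.2)

-- ===== PRECONDITION & SPEC =====
-- Pre_ excludes exactly the inputs on which Python A raises IndexError: an adjacent duplicate
-- whose value v makes v-2 fall outside the Python index range -13..12 of the 13-slot duplicates list.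
def Pre_prep_pool (real_pool : List Int) : Prop :=
  (real_pool.map (fun c => PySem.Int.truncdiv c 10000)).IsChain
    (fun a b => a = b → -11 ≤ b ∧ b ≤ 14)
instance (real_pool : List Int) : Decidable (Pre_prep_pool real_pool) := by
  unfold Pre_prep_pool; infer_instance
def pvWitness_prep_pool : List Int := [20001, 20002, 30000, 30000, 145000]

def Spec_prep_pool (real_pool : List Int) (out : List Int × List Int × List Int) : Prop := out = prep_pool_alt real_pool
instance (real_pool : List Int) (out : List Int × List Int × List Int) : Decidable (Spec_prep_pool real_pool out) := by unfold Spec_prep_pool; infer_instance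

-- ===== CLAIM (what is proved, stated in full; the proofs are below) =====
def Claim_equal_prep_pool : Prop := ∀ (real_pool : List Int), Dom_prep_pool real_pool → Pre_prep_pool real_pool → Spec_prep_pool real_pool (prep_pool real_pool)

-- ===== LEMMAS AND PROOFS =====

-- proof-side restatement of B's outer loop on the suffix list it still has to process
def runLen (v : Int) (tl : List Int) : Nat :=
  1 + (tl.takeWhile (· == v)).length

def altList (rest straight duplicates : List Int) : List Int × List Int :=
  match rest with
  | [] => (straight, duplicates)
  | v :: tl =>
    let run := runLen v tl
    let straight' := straight ++ [v]
    let duplicates' :=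
      if run > 1 then pyIncAt duplicates (v - 2) ((run : Int) - 1) else duplicates
    altList ((v :: tl).drop run) straight' duplicates'
termination_by rest.length
decreasing_by
  simp only [runLen, List.length_drop, List.length_cons]
  omega

theorem scanRun_eq (pool : List Int) (v : Int) : ∀ j,
    scanRun pool v j = j + ((pool.drop j).takeWhile (· == v)).length := by
  intro j
  fun_induction scanRun pool v j with
  | case1 j hj hv ih =>
    have hdrop : pool.drop j = pool[j] :: pool.drop (j + 1) :=
      (List.getElem_cons_drop hj).symm
    have hg : pool.getD j 0 = pool[j] := List.getD_eq_getElem pool 0 hj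
    rw [ih, hdrop]
    rw [hg] at hv
    simp [hv]
    omega
  | case2 j hj hv =>
    have hdrop : pool.drop j = pool[j] :: pool.drop (j + 1) :=
      (List.getElem_cons_drop hj).symm
    have hg : pool.getD j 0 = pool[j] := List.getD_eq_getElem pool 0 hj
    rw [hdrop]
    rw [hg] at hv
    simp [hv]
  | case3 j hj =>
    have : pool.drop j = [] := List.drop_eq_nil_of_le (by omega)
    simp [this]

theorem altLoop_eq_altList (pool : List Int) : ∀ i s d,
    altLoop pool i s d = altList (pool.drop i) s d := by
  intro i s d
  fun_induction altLoop pool i s d with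
  | case1 i s d h v j straight' duplicates' ih =>
    rw [ih]
    have hv : v = pool[i] := List.getD_eq_getElem pool 0 h
    have hd : pool.drop i = v :: pool.drop (i + 1) := by
      rw [hv]; exact (List.getElem_cons_drop h).symm
    rw [hd, altList]
    set k := ((pool.drop (i + 1)).takeWhile (· == v)).length with hk
    have hj : j = i + 1 + k := scanRun_eq pool v (i + 1)
    have hrun : runLen v (pool.drop (i + 1)) = 1 + k := by rw [runLen]
    have hdrop : (v :: pool.drop (i + 1)).drop (runLen v (pool.drop (i + 1)))
        = pool.drop j := by
      rw [hrun, Nat.add_comm, List.drop_succ_cons, List.drop_drop, hj]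
    have hdup : duplicates'
        = (if runLen v (pool.drop (i + 1)) > 1 then
            pyIncAt d (v - 2) ((runLen v (pool.drop (i + 1)) : Int) - 1) else d) := by
      show (if j - i > 1 then pyIncAt d (v - 2) ((j : Int) - (i : Int) - 1) else d) = _
      rw [hrun, hj]
      by_cases hk0 : k = 0
      · simp [hk0]
      · have c1 : i + 1 + k - i > 1 := by omega
        have c2 : 1 + k > 1 := by omega
        rw [if_pos c1, if_pos c2]
        congr 1
        push_cast; omega
    rw [hdrop, hdup]
  | case2 i s d h =>
    have hnil : pool.drop i = [] := List.drop_eq_nil_of_le (by omega)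
    rw [hnil, altList]

-- A's loop re-expressed on the value list: the adjacency test pool[num-1] == card
-- becomes "the last value built so far equals the new value".
def aFold : List Int → List Int × List Int × List Int → List Int × List Int × List Int
  | [], st => st
  | v :: vs, st =>
    aFold vs (st.1 ++ [v],
      if st.1.getLast? = some v then (st.2.1, pyIncAt st.2.2 (v - 2) 1)
      else (st.2.1 ++ [v], st.2.2))

theorem pyIdx?_lt {n : Nat} {i : Int} {k : Nat} (h : PySem.List.pyIdx? n i = some k) : k < n := by
  simp only [PySem.List.pyIdx?] at h
  split_ifs at h <;> simp_all <;> omega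

theorem pyIncAt_zero (xs : List Int) (i : Int) : pyIncAt xs i 0 = xs := by
  simp only [pyIncAt, PySem.List.pySetD, PySem.List.pySet?, PySem.List.pyGetD,
    PySem.List.pyGet?]
  cases h : PySem.List.pyIdx? xs.length i with
  | none => simp
  | some k =>
    have hk := pyIdx?_lt h
    simp [List.getElem?_eq_getElem hk, List.set_getElem_self]

theorem pyIncAt_add (xs : List Int) (i a b : Int) :
    pyIncAt (pyIncAt xs i a) i b = pyIncAt xs i (a + b) := by
  simp only [pyIncAt, PySem.List.pySetD, PySem.List.pySet?, PySem.List.pyGetD,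
    PySem.List.pyGet?]
  cases h : PySem.List.pyIdx? xs.length i with
  | none => simp [h]
  | some k =>
    have hk := pyIdx?_lt h
    simp only [h, Option.map_some, Option.getD_some, Option.bind_some,
      List.length_set, List.getElem?_eq_getElem hk,
      List.getElem?_eq_getElem (by simpa using hk : k < (xs.set k (xs[k] + a)).length)]
    simp [List.getElem_set_self, List.set_set, add_assoc]

-- pool[num-1] after pool.append(card), with num = previous length, is the previous last element
theorem cond_iff (p : List Int) (card : Int) :
    (((p.length : Int) ≠ 0 ∧
        PySem.List.pyGet? (p ++ [card]) ((p.length : Int) - 1) = some card)) ↔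
      p.getLast? = some card := by
  rcases List.eq_nil_or_concat p with rfl | ⟨q, w, rfl⟩
  · simp
  · simp only [List.concat_eq_append]
    have hlen : (((q ++ [w]).length : Int)) - 1 = ((q.length : Nat) : Int) := by
      simp
    rw [hlen, PySem.List.pyGet?_natCast]
    have hg : (q ++ [w] ++ [card])[q.length]? = some w := by
      rw [List.append_assoc, List.getElem?_append_right (le_refl q.length)]
      simp
    have h1 : ((q ++ [w]).length : Int) ≠ 0 := by simp; omega
    have h2 : (q ++ [w]).getLast? = some w := by simp
    rw [hg, h2]
    exact and_iff_right h1

theorem enum_fold (vs : List Int) : ∀ (p s d : List Int),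
    (PySem.List.enumerate vs (p.length : Int)).foldl prep_pool_step (p, s, d)
      = aFold (vs.map (fun c => PySem.Int.truncdiv c 10000)) (p, s, d) := by
  induction vs with
  | nil => intro p s d; simp [PySem.List.enumerate_nil, aFold]
  | cons c vs ih =>
    intro p s d
    rw [PySem.List.enumerate_cons]
    simp only [List.foldl_cons, List.map_cons, aFold]
    set card := PySem.Int.truncdiv c 10000 with hcard
    have hstep : prep_pool_step (p, s, d) ((p.length : Int), c) =
        (p ++ [card],
          if p.getLast? = some card then (s, pyIncAt d (card - 2) 1)
          else (s ++ [card], d)) := by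
      simp only [prep_pool_step, ← hcard]
      by_cases h : p.getLast? = some card
      · rw [if_pos ((cond_iff p card).mpr h), if_pos h]
      · rw [if_neg (fun hc => h ((cond_iff p card).mp hc)), if_neg h]
    rw [hstep]
    by_cases h : p.getLast? = some card
    · rw [if_pos h]
      have := ih (p ++ [card]) s (pyIncAt d (card - 2) 1)
      simpa [Int.add_comm] using this
    · rw [if_neg h]
      have := ih (p ++ [card]) (s ++ [card]) d
      simpa [Int.add_comm] using this

theorem dropWhile_eq_drop_takeWhile {α : Type} (p : α → Bool) (l : List α) :
    l.dropWhile p = l.drop (l.takeWhile p).length := by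
  induction l with
  | nil => simp
  | cons x xs ih =>
    by_cases h : p x
    · simp [h, ih]
    · simp [h]

theorem takeWhile_beq_replicate (v : Int) (l : List Int) :
    l.takeWhile (· == v) = List.replicate (l.takeWhile (· == v)).length v := by
  rw [List.eq_replicate_iff]
  refine ⟨rfl, fun x hx => ?_⟩
  have := List.mem_takeWhile_imp hx
  simpa using this.symm

theorem head?_dropWhile_ne (v : Int) (l : List Int) :
    (l.dropWhile (· == v)).head? ≠ some v := by
  induction l with
  | nil => simp
  | cons x xs ih =>
    by_cases h : x = v
    · simpa [List.dropWhile_cons, h] using ih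
    · simp [h]

theorem aFold_replicate (k : Nat) (vs : List Int) (v : Int) : ∀ (p s d : List Int),
    p.getLast? = some v →
    aFold (List.replicate k v ++ vs) (p, s, d)
      = aFold vs (p ++ List.replicate k v, s, pyIncAt d (v - 2) (k : Int)) := by
  induction k with
  | zero => intro p s d _; simp [pyIncAt_zero]
  | succ k ih =>
    intro p s d hp
    rw [List.replicate_succ, List.cons_append]
    simp only [aFold]
    rw [if_pos hp]
    rw [ih (p ++ [v]) s (pyIncAt d (v - 2) 1) (by simp)]
    rw [pyIncAt_add]
    have hA : p ++ [v] ++ List.replicate k v = p ++ v :: List.replicate k v := by simp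
    have hd : (1 : Int) + (k : Int) = ((k + 1 : Nat) : Int) := by push_cast; omega
    rw [hA, hd]

theorem aFold_altList : ∀ (n : Nat) (vs p s d : List Int), vs.length ≤ n →
    (∀ v, vs.head? = some v → p.getLast? ≠ some v) →
    aFold vs (p, s, d) = (p ++ vs, altList vs s d) := by
  intro n
  induction n with
  | zero =>
    intro vs p s d hlen _
    have : vs = [] := List.eq_nil_of_length_eq_zero (by omega)
    subst this; simp [aFold, altList]
  | succ n ih =>
    intro vs p s d hlen hhd
    cases vs with
    | nil => simp [aFold, altList]
    | cons v tl =>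
      have hne : p.getLast? ≠ some v := hhd v rfl
      simp only [aFold, if_neg hne]
      set k := (tl.takeWhile (· == v)).length with hk
      have htl : tl = List.replicate k v ++ tl.dropWhile (· == v) := by
        conv_lhs => rw [← List.takeWhile_append_dropWhile (p := (· == v)) (l := tl)]
        rw [← takeWhile_beq_replicate]
      set rest := tl.dropWhile (· == v) with hrest
      have hlast : (p ++ [v]).getLast? = some v := by simp
      have step1 : aFold tl (p ++ [v], s ++ [v], d)
          = aFold rest (p ++ [v] ++ List.replicate k v, s ++ [v],
              pyIncAt d (v - 2) (k : Int)) := by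
        conv_lhs => rw [htl]
        exact aFold_replicate k rest v (p ++ [v]) (s ++ [v]) d hlast
      rw [step1]
      have hrestlen : rest.length ≤ n := by
        have h1 : rest.length ≤ tl.length := by
          rw [hrest]; exact List.length_dropWhile_le _ _
        simp at hlen; omega
      have hrhd : ∀ w, rest.head? = some w →
          (p ++ [v] ++ List.replicate k v).getLast? ≠ some w := by
        intro w hw
        have hwv : w ≠ v := by
          intro h
          rw [h] at hw
          exact head?_dropWhile_ne v tl (hrest ▸ hw)
        have hlastrep : (p ++ [v] ++ List.replicate k v).getLast? = some v := by
          rw [List.append_assoc, List.getLast?_append]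
          have hrep : ([v] ++ List.replicate k v : List Int)
              = List.replicate (k + 1) v := by
            simp [List.replicate_succ]
          rw [hrep, List.getLast?_replicate]
          simp
        rw [hlastrep]
        simp only [ne_eq, Option.some.injEq]
        exact fun h => hwv h.symm
      rw [ih rest _ _ _ hrestlen hrhd]
      -- identify with altList (v :: tl) s d
      have haltstep : altList (v :: tl) s d
          = altList rest (s ++ [v]) (pyIncAt d (v - 2) (k : Int)) := by
        rw [altList]
        have hrun : runLen v tl = 1 + k := by rw [runLen]
        have hdrop : (v :: tl).drop (runLen v tl) = rest := by
          rw [hrun, Nat.add_comm, List.drop_succ_cons, hrest,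
            dropWhile_eq_drop_takeWhile]
        rw [hdrop, hrun]
        by_cases hkpos : k = 0
        · have h1 : ¬ (1 + k > 1) := by simp [hkpos]
          rw [if_neg h1, hkpos]
          norm_num [pyIncAt_zero]
        · have hgt : 1 + k > 1 := Nat.lt_add_of_pos_right (Nat.pos_of_ne_zero hkpos)
          rw [if_pos hgt]
          have hcast : ((1 + k : Nat) : Int) - 1 = (k : Int) := by push_cast; omega
          rw [hcast]
      rw [haltstep]
      have hpool : p ++ [v] ++ List.replicate k v ++ rest = p ++ v :: tl := by
        conv_rhs => rw [htl]
        simp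
      rw [hpool]

-- ===== VERDICT (by name: the statement is the Claim_ definition above) =====
theorem prep_pool_spec : Claim_equal_prep_pool := by
  intro real_pool _ _
  unfold Spec_prep_pool prep_pool prep_pool_alt
  have h0 : (PySem.List.enumerate real_pool 0).foldl prep_pool_step
      ([], [], [0, 0, 0, 0, 0, 0, 0, 0, 0, 0, 0, 0, 0])
        = aFold (real_pool.map (fun c => PySem.Int.truncdiv c 10000))
            ([], [], [0, 0, 0, 0, 0, 0, 0, 0, 0, 0, 0, 0, 0]) := by
    have := enum_fold real_pool [] [] [0, 0, 0, 0, 0, 0, 0, 0, 0, 0, 0, 0, 0]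
    simpa using this
  rw [h0]
  set vals := real_pool.map (fun c => PySem.Int.truncdiv c 10000) with hvals
  have := aFold_altList vals.length vals [] [] [0, 0, 0, 0, 0, 0, 0, 0, 0, 0, 0, 0, 0]
    le_rfl (by intro v hv; simp)
  rw [this]
  simp [altLoop_eq_altList]
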